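-- pv_equiv track=rewrite | github.com/taiwanfifi/CarbonStack | experiments/03_model_comparison/run_cmps.py | merge_pragmas_cmps
-- ===== SOURCE A (Python) =====
-- def classify_pragma(p):
--     """Classify pragma into LOOP (pipeline/unroll) or MEMORY (partition)."""
--     p_upper = p.upper()
--     if 'PIPELINE' in p_upper: return 'LOOP'
--     if 'UNROLL' in p_upper: return 'LOOP'
--     if 'PARTITION' in p_upper or 'RESHAPE' in p_upper: return 'MEMORY'
--     if 'INTERFACE' in p_upper: return 'INTERFACE'
--     return 'OTHER'
--
-- def merge_pragmas_cmps(qwen_pragmas, gemma_pragmas):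
--     """
--     Cross-Model Pragma Synthesis:
--     - LOOP pragmas (PIPELINE, UNROLL) from Qwen
--     - MEMORY pragmas (PARTITION) from Gemma4
--     - INTERFACE/OTHER: take from whichever has it
--     """
--     merged = []
--     sources = {}  # track which model each pragma came from
--
--     # Gemma4's MEMORY pragmas
--     for p in gemma_pragmas:
--         if classify_pragma(p) == 'MEMORY':
--             merged.append(p)
--             sources[p] = 'gemma4'
--
--     # Qwen's LOOP pragmas
--     for p in qwen_pragmas:
--         cat = classify_pragma(p)
--         if cat == 'LOOP':
--             merged.append(p)
--             sources[p] = 'qwen'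
--         elif cat in ('INTERFACE', 'OTHER'):
--             if not any(classify_pragma(m) == cat for m in merged):
--                 merged.append(p)
--                 sources[p] = 'qwen'
--
--     # If Gemma4 had LOOP pragmas that Qwen missed, add them
--     for p in gemma_pragmas:
--         cat = classify_pragma(p)
--         if cat == 'LOOP' and not any(classify_pragma(m) == 'LOOP' and m != p for m in merged):
--             # Only add if Qwen has NO loop pragmas at all
--             if not any(classify_pragma(m) == 'LOOP' for m in merged if sources.get(m) == 'qwen'):
--                 merged.append(p)
--                 sources[p] = 'gemma4_fallback'
--
--     return merged, sources
-- ===== SOURCE B (Python) =====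
-- def classify_pragma(p):
--     """Classify pragma into LOOP (pipeline/unroll) or MEMORY (partition)."""
--     p_upper = p.upper()
--     if 'PIPELINE' in p_upper: return 'LOOP'
--     if 'UNROLL' in p_upper: return 'LOOP'
--     if 'PARTITION' in p_upper or 'RESHAPE' in p_upper: return 'MEMORY'
--     if 'INTERFACE' in p_upper: return 'INTERFACE'
--     return 'OTHER'
--
-- def merge_pragmas_cmps(qwen_pragmas, gemma_pragmas):
--     # One classification pass per list, then assemble the segments by concatenation.
--     gemma_mem = [p for p in gemma_pragmas if classify_pragma(p) == 'MEMORY']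
--     gemma_loops = [p for p in gemma_pragmas if classify_pragma(p) == 'LOOP']
--
--     qwen_part = []
--     seen_iface = seen_other = has_qwen_loop = False
--     for p in qwen_pragmas:
--         c = classify_pragma(p)
--         if c == 'LOOP':
--             qwen_part.append(p)
--             has_qwen_loop = True
--         elif c == 'INTERFACE':
--             if not seen_iface:
--                 qwen_part.append(p)
--                 seen_iface = True
--         elif c == 'OTHER':
--             if not seen_other:
--                 qwen_part.append(p)
--                 seen_other = True
--
--     # Fall back to Gemma's loop pragmas only when Qwen produced none.
--     fallback = [] if has_qwen_loop else gemma_loops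
--
--     merged = gemma_mem + qwen_part + fallback
--     sources = {}
--     for p in gemma_mem:
--         sources[p] = 'gemma4'
--     for p in qwen_part:
--         sources[p] = 'qwen'
--     for p in fallback:
--         sources[p] = 'gemma4_fallback'
--     return merged, sources
-- ===== Notes on version B (the rewrite author's own statement) =====
-- stated objective: faster
-- what changed: Single classification pass building buckets (gemma MEMORY, qwen LOOP/first-INTERFACE/first-OTHER via seen-flags, a has-loop flag, gemma LOOP fallback) assembled by concatenation, replacing A's interleaved loops that rescan the growing merged list with any() on every step.
-- intended difference: When qwen yields no LOOP pragma and gemma's LOOP pragmas are not all equal to the first one, A's 'm != p' membership test adds only the copies of the first gemma LOOP pragma, while B adds all gemma LOOP pragmas, which is the stated intent ('If Gemma4 had LOOP pragmas that Qwen missed, add them'). — e.g. on merge_pragmas_cmps([], ["pipeline", "unroll x"]): A returns (["pipeline"], [("pipeline", "gemma4_fallback")]), B returns (["pipeline", "unroll x"], [("pipeline", "gemma4_fallback"), ("unroll x", "gemma4_fallback")])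
import Mathlib
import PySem

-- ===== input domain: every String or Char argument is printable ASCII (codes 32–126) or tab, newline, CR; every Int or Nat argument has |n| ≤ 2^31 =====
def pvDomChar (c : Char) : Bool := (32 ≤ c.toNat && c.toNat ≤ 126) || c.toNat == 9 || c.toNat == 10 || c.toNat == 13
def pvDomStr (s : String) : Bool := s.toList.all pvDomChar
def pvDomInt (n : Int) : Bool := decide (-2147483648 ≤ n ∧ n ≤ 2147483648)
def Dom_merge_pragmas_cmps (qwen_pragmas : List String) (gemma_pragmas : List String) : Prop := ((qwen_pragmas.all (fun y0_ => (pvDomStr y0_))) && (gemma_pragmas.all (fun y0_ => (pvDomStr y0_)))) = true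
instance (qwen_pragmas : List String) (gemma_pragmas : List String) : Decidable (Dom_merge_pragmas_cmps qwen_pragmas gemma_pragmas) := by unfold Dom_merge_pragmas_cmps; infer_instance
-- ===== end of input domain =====

-- B replaces A's interleaved merge loops (which rescan `merged` with any() at each step)
-- by one classification pass into buckets concatenated at the end; objective: faster (asymptotic);
-- B intentionally adds ALL gemma LOOP pragmas as fallback (see D_ below) where A adds only copies of the first.


-- ===== PORT A =====
-- shared module helper (used verbatim by both Pythons)
def classify_pragma (p : String) : String :=
  let p_upper := PySem.Str.upper p
  if PySem.Str.isIn "PIPELINE" p_upper then "LOOP"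
  else if PySem.Str.isIn "UNROLL" p_upper then "LOOP"
  else if PySem.Str.isIn "PARTITION" p_upper || PySem.Str.isIn "RESHAPE" p_upper then "MEMORY"
  else if PySem.Str.isIn "INTERFACE" p_upper then "INTERFACE"
  else "OTHER"

def merge_pragmas_cmps (qwen_pragmas : List String) (gemma_pragmas : List String) : List String × (List (String × String)) :=
  let st0 : List String × PySem.Dict String String := ([], PySem.Dict.empty)
  -- Gemma4's MEMORY pragmas
  let st1 := gemma_pragmas.foldl (fun st p =>
    if classify_pragma p == "MEMORY" then (st.1 ++ [p], st.2.insert p "gemma4") else st) st0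
  -- Qwen's LOOP pragmas
  let st2 := qwen_pragmas.foldl (fun st p =>
    let cat := classify_pragma p
    if cat == "LOOP" then (st.1 ++ [p], st.2.insert p "qwen")
    else if cat == "INTERFACE" || cat == "OTHER" then
      if ! st.1.any (fun m => classify_pragma m == cat) then (st.1 ++ [p], st.2.insert p "qwen")
      else st
    else st) st1
  -- Gemma4 LOOP fallback
  let st3 := gemma_pragmas.foldl (fun st p =>
    let cat := classify_pragma p
    if cat == "LOOP" && ! st.1.any (fun m => classify_pragma m == "LOOP" && m != p) then
      if ! st.1.any (fun m => classify_pragma m == "LOOP" && st.2.get? m == some "qwen") then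
        (st.1 ++ [p], st.2.insert p "gemma4_fallback")
      else st
    else st) st2
  (st3.1, st3.2.items)

-- ===== PORT B =====
def merge_pragmas_cmps_alt (qwen_pragmas : List String) (gemma_pragmas : List String) : List String × (List (String × String)) :=
  let gemma_mem := gemma_pragmas.filter (fun p => classify_pragma p == "MEMORY")
  let gemma_loops := gemma_pragmas.filter (fun p => classify_pragma p == "LOOP")
  -- state: (qwen_part, seen_iface, seen_other, has_qwen_loop)
  let q := qwen_pragmas.foldl (fun (st : List String × Bool × Bool × Bool) p =>
    let c := classify_pragma p
    if c == "LOOP" then (st.1 ++ [p], st.2.1, st.2.2.1, true)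
    else if c == "INTERFACE" then (if st.2.1 then st else (st.1 ++ [p], true, st.2.2.1, st.2.2.2))
    else if c == "OTHER" then (if st.2.2.1 then st else (st.1 ++ [p], st.2.1, true, st.2.2.2))
    else st) ([], false, false, false)
  let qwen_part := q.1
  let has_qwen_loop := q.2.2.2
  let fallback := if has_qwen_loop then [] else gemma_loops
  let merged := gemma_mem ++ qwen_part ++ fallback
  let s0 : PySem.Dict String String := PySem.Dict.empty
  let s1 := gemma_mem.foldl (fun d p => d.insert p "gemma4") s0
  let s2 := qwen_part.foldl (fun d p => d.insert p "qwen") s1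
  let s3 := fallback.foldl (fun d p => d.insert p "gemma4_fallback") s2
  (merged, s3.items)

-- ===== PRECONDITION & SPEC =====
-- When qwen yields no LOOP pragma and gemma's LOOP pragmas are not all equal to the first one,
-- A's 'm != p' membership test adds only the copies of the first gemma LOOP pragma, while B adds
-- ALL gemma LOOP pragmas — the stated intent ('If Gemma4 had LOOP pragmas that Qwen missed, add them').
def D_merge_pragmas_cmps (qwen_pragmas : List String) (gemma_pragmas : List String) : Prop :=
  (qwen_pragmas.any (fun p => classify_pragma p == "LOOP")) = false ∧
  ∃ p ∈ gemma_pragmas.filter (fun x => classify_pragma x == "LOOP"),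
    (gemma_pragmas.filter (fun x => classify_pragma x == "LOOP")).head? ≠ some p
instance (qwen_pragmas : List String) (gemma_pragmas : List String) : Decidable (D_merge_pragmas_cmps qwen_pragmas gemma_pragmas) := by unfold D_merge_pragmas_cmps; infer_instance

def Spec_merge_pragmas_cmps (qwen_pragmas : List String) (gemma_pragmas : List String) (out : List String × (List (String × String))) : Prop := ¬ D_merge_pragmas_cmps qwen_pragmas gemma_pragmas → out = merge_pragmas_cmps_alt qwen_pragmas gemma_pragmas
instance (qwen_pragmas : List String) (gemma_pragmas : List String) (out : List String × (List (String × String))) : Decidable (Spec_merge_pragmas_cmps qwen_pragmas gemma_pragmas out) := by unfold Spec_merge_pragmas_cmps; infer_instance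

def pvDiffWitness_merge_pragmas_cmps : List String × List String := ([], ["pipeline", "unroll x"])
def pvDiffWitnessOut_merge_pragmas_cmps : (List String × (List (String × String))) × (List String × (List (String × String))) :=
  ((["pipeline"], [("pipeline", "gemma4_fallback")]),
   (["pipeline", "unroll x"], [("pipeline", "gemma4_fallback"), ("unroll x", "gemma4_fallback")]))

-- ===== CLAIM (what is proved, stated in full; the proofs are below) =====
def Claim_unchanged_merge_pragmas_cmps : Prop := ∀ (qwen_pragmas : List String) (gemma_pragmas : List String), Dom_merge_pragmas_cmps qwen_pragmas gemma_pragmas → Spec_merge_pragmas_cmps qwen_pragmas gemma_pragmas (merge_pragmas_cmps qwen_pragmas gemma_pragmas)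
def Claim_changed_merge_pragmas_cmps : Prop := Dom_merge_pragmas_cmps (pvDiffWitness_merge_pragmas_cmps.1) (pvDiffWitness_merge_pragmas_cmps.2) ∧ D_merge_pragmas_cmps (pvDiffWitness_merge_pragmas_cmps.1) (pvDiffWitness_merge_pragmas_cmps.2) ∧ merge_pragmas_cmps (pvDiffWitness_merge_pragmas_cmps.1) (pvDiffWitness_merge_pragmas_cmps.2) = pvDiffWitnessOut_merge_pragmas_cmps.1 ∧ merge_pragmas_cmps_alt (pvDiffWitness_merge_pragmas_cmps.1) (pvDiffWitness_merge_pragmas_cmps.2) = pvDiffWitnessOut_merge_pragmas_cmps.2 ∧ pvDiffWitnessOut_merge_pragmas_cmps.1 ≠ pvDiffWitnessOut_merge_pragmas_cmps.2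
def Claim_exact_merge_pragmas_cmps : Prop := ∀ (qwen_pragmas : List String) (gemma_pragmas : List String), Dom_merge_pragmas_cmps qwen_pragmas gemma_pragmas → D_merge_pragmas_cmps qwen_pragmas gemma_pragmas → merge_pragmas_cmps qwen_pragmas gemma_pragmas ≠ merge_pragmas_cmps_alt qwen_pragmas gemma_pragmas

-- ===== LEMMAS AND PROOFS =====

-- named copies of the ports' loop bodies (definitionally equal to the lambdas in the ports)
def stepA1 (st : List String × PySem.Dict String String) (p : String) : List String × PySem.Dict String String :=
  if classify_pragma p == "MEMORY" then (st.1 ++ [p], st.2.insert p "gemma4") else st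

def stepA2 (st : List String × PySem.Dict String String) (p : String) : List String × PySem.Dict String String :=
  let cat := classify_pragma p
  if cat == "LOOP" then (st.1 ++ [p], st.2.insert p "qwen")
  else if cat == "INTERFACE" || cat == "OTHER" then
    if ! st.1.any (fun m => classify_pragma m == cat) then (st.1 ++ [p], st.2.insert p "qwen")
    else st
  else st

def stepA3 (st : List String × PySem.Dict String String) (p : String) : List String × PySem.Dict String String :=
  let cat := classify_pragma p
  if cat == "LOOP" && ! st.1.any (fun m => classify_pragma m == "LOOP" && m != p) then
    if ! st.1.any (fun m => classify_pragma m == "LOOP" && st.2.get? m == some "qwen") then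
      (st.1 ++ [p], st.2.insert p "gemma4_fallback")
    else st
  else st

def stepB (st : List String × Bool × Bool × Bool) (p : String) : List String × Bool × Bool × Bool :=
  let c := classify_pragma p
  if c == "LOOP" then (st.1 ++ [p], st.2.1, st.2.2.1, true)
  else if c == "INTERFACE" then (if st.2.1 then st else (st.1 ++ [p], true, st.2.2.1, st.2.2.2))
  else if c == "OTHER" then (if st.2.2.1 then st else (st.1 ++ [p], st.2.1, true, st.2.2.2))
  else st

-- proof-side abbreviations
def insFold (v : String) (l : List String) (d : PySem.Dict String String) : PySem.Dict String String :=
  l.foldl (fun d p => d.insert p v) d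

def hasCat (cat : String) (l : List String) : Bool :=
  l.any (fun m => classify_pragma m == cat)

-- B's qwen pass, as structural recursion on the input (for the inductions)
def qpart : List String → Bool → Bool → List String
  | [], _, _ => []
  | p :: ps, si, so =>
    if classify_pragma p == "LOOP" then p :: qpart ps si so
    else if classify_pragma p == "INTERFACE" then
      (if si then qpart ps si so else p :: qpart ps true so)
    else if classify_pragma p == "OTHER" then
      (if so then qpart ps si so else p :: qpart ps si true)
    else qpart ps si so

-- A's fallback segment: all occurrences of the first gemma LOOP pragma
def fb (g : List String) : List String :=
  match g.filter (fun p => classify_pragma p == "LOOP") with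
  | [] => []
  | f :: _ => (g.filter (fun p => classify_pragma p == "LOOP")).filter (fun p => p == f)

-- B's fallback segment
def fallbackB (hl : Bool) (g : List String) : List String :=
  if hl then [] else g.filter (fun p => classify_pragma p == "LOOP")

-- the ports, re-stated through the named step functions (definitional)
theorem portA_eq (q g : List String) :
    merge_pragmas_cmps q g =
    ((g.foldl stepA3 (q.foldl stepA2 (g.foldl stepA1 ([], PySem.Dict.empty)))).1,
     (g.foldl stepA3 (q.foldl stepA2 (g.foldl stepA1 ([], PySem.Dict.empty)))).2.items) := rfl

theorem portB_eq (q g : List String) :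
    merge_pragmas_cmps_alt q g =
    (g.filter (fun p => classify_pragma p == "MEMORY") ++ (q.foldl stepB ([], false, false, false)).1 ++
       fallbackB (q.foldl stepB ([], false, false, false)).2.2.2 g,
     (insFold "gemma4_fallback" (fallbackB (q.foldl stepB ([], false, false, false)).2.2.2 g)
       (insFold "qwen" ((q.foldl stepB ([], false, false, false)).1)
         (insFold "gemma4" (g.filter (fun p => classify_pragma p == "MEMORY")) PySem.Dict.empty))).items) := rfl

theorem insFold_cons (v p : String) (l : List String) (d : PySem.Dict String String) :
    insFold v (p :: l) d = insFold v l (d.insert p v) := rfl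

theorem get?_insFold_not_mem {v k : String} {l : List String} (d : PySem.Dict String String)
    (h : k ∉ l) : (insFold v l d).get? k = d.get? k := by
  induction l generalizing d with
  | nil => rfl
  | cons p ps ih =>
    simp only [List.mem_cons, not_or] at h
    rw [insFold_cons, ih _ h.2]
    simp [pysem, h.1]

theorem get?_insFold_mem {v k : String} {l : List String} (d : PySem.Dict String String)
    (h : k ∈ l) : (insFold v l d).get? k = some v := by
  induction l generalizing d with
  | nil => cases h
  | cons p ps ih =>
    rw [insFold_cons]
    by_cases hk : k ∈ ps
    · exact ih _ hk
    · have hkp : k = p := by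
        rcases List.mem_cons.mp h with h1 | h2
        · exact h1
        · exact absurd h2 hk
      subst hkp
      rw [get?_insFold_not_mem _ hk]
      simp [pysem]

theorem hasCat_append_singleton (cat p : String) (l : List String) :
    hasCat cat (l ++ [p]) = (hasCat cat l || (classify_pragma p == cat)) := by
  simp [hasCat]

theorem hasCat_cons (cat p : String) (l : List String) :
    hasCat cat (p :: l) = ((classify_pragma p == cat) || hasCat cat l) := by
  simp [hasCat]

theorem qpart_subset {m : String} {q : List String} {si so : Bool}
    (h : m ∈ qpart q si so) : m ∈ q := by
  induction q generalizing si so with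
  | nil => simp [qpart] at h
  | cons p ps ih =>
    simp only [qpart] at h
    split_ifs at h <;> simp only [List.mem_cons] at h ⊢ <;>
      first
        | (rcases h with rfl | h
           · exact Or.inl rfl
           · exact Or.inr (ih h))
        | exact Or.inr (ih h)

theorem loop_mem_qpart {m : String} {q : List String} (si so : Bool)
    (hm : m ∈ q) (hl : classify_pragma m = "LOOP") : m ∈ qpart q si so := by
  induction q generalizing si so with
  | nil => cases hm
  | cons p ps ih =>
    simp only [qpart]
    rcases List.mem_cons.mp hm with rfl | hm'
    · simp [hl]
    · split_ifs <;>
        first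
          | exact List.mem_cons_of_mem _ (ih _ _ hm')
          | exact ih _ _ hm'

-- phase 1 of A collects gemma's MEMORY pragmas
theorem phase1_eq (g : List String) (st : List String × PySem.Dict String String) :
    g.foldl stepA1 st =
    (st.1 ++ g.filter (fun p => classify_pragma p == "MEMORY"),
     insFold "gemma4" (g.filter (fun p => classify_pragma p == "MEMORY")) st.2) := by
  induction g generalizing st with
  | nil => simp [insFold]
  | cons p ps ih =>
    rw [List.foldl_cons, List.filter_cons]
    by_cases hp : (classify_pragma p == "MEMORY") = true
    · have hstep : stepA1 st p = (st.1 ++ [p], st.2.insert p "gemma4") := by simp [stepA1, hp]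
      rw [hstep, ih, hp]
      simp [insFold_cons]
    · have hstep : stepA1 st p = st := by simp [stepA1, hp]
      rw [hstep, ih]
      simp [hp]

-- phase 2 of A collects qwen's LOOP pragmas plus the first INTERFACE/OTHER
theorem phase2_eq (q : List String) (st : List String × PySem.Dict String String) :
    q.foldl stepA2 st =
    (st.1 ++ qpart q (hasCat "INTERFACE" st.1) (hasCat "OTHER" st.1),
     insFold "qwen" (qpart q (hasCat "INTERFACE" st.1) (hasCat "OTHER" st.1)) st.2) := by
  induction q generalizing st with
  | nil => simp [qpart, insFold]
  | cons p ps ih =>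
    rw [List.foldl_cons]
    by_cases h1 : (classify_pragma p == "LOOP") = true
    · have hstep : stepA2 st p = (st.1 ++ [p], st.2.insert p "qwen") := by simp [stepA2, h1]
      have hI : hasCat "INTERFACE" (st.1 ++ [p]) = hasCat "INTERFACE" st.1 := by
        rw [hasCat_append_singleton, eq_of_beq h1]; simp
      have hO : hasCat "OTHER" (st.1 ++ [p]) = hasCat "OTHER" st.1 := by
        rw [hasCat_append_singleton, eq_of_beq h1]; simp
      rw [hstep, ih, hI, hO]
      simp only [qpart, h1, if_true]
      simp [insFold_cons]
    · by_cases h2 : (classify_pragma p == "INTERFACE") = true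
      · have hceq := eq_of_beq h2
        by_cases hsi : hasCat "INTERFACE" st.1 = true
        · have hsi' : (st.1.any fun m => classify_pragma m == "INTERFACE") = true := hsi
          have hstep : stepA2 st p = st := by
            simp [stepA2, hceq, hsi']
          rw [hstep, ih]
          simp only [qpart, h1, h2, Bool.false_eq_true, if_false, if_true, hsi]
        · have hsi' : (st.1.any fun m => classify_pragma m == "INTERFACE") = false :=
            Bool.eq_false_iff.mpr hsi
          have hstep : stepA2 st p = (st.1 ++ [p], st.2.insert p "qwen") := by
            simp [stepA2, hceq, hsi']
          have hI : hasCat "INTERFACE" (st.1 ++ [p]) = true := by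
            rw [hasCat_append_singleton, hceq]; simp
          have hO : hasCat "OTHER" (st.1 ++ [p]) = hasCat "OTHER" st.1 := by
            rw [hasCat_append_singleton, hceq]; simp
          rw [hstep, ih, hI, hO]
          simp only [qpart, h1, h2, Bool.false_eq_true, if_false, if_true,
            Bool.eq_false_iff.mpr hsi]
          simp [insFold_cons]
      · by_cases h3 : (classify_pragma p == "OTHER") = true
        · have hceq := eq_of_beq h3
          by_cases hso : hasCat "OTHER" st.1 = true
          · have hso' : (st.1.any fun m => classify_pragma m == "OTHER") = true := hso
            have hstep : stepA2 st p = st := by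
              simp [stepA2, hceq, hso']
            rw [hstep, ih]
            simp only [qpart, h1, h2, h3, Bool.false_eq_true, if_false, if_true, hso]
          · have hso' : (st.1.any fun m => classify_pragma m == "OTHER") = false :=
              Bool.eq_false_iff.mpr hso
            have hstep : stepA2 st p = (st.1 ++ [p], st.2.insert p "qwen") := by
              simp [stepA2, hceq, hso']
            have hI : hasCat "INTERFACE" (st.1 ++ [p]) = hasCat "INTERFACE" st.1 := by
              rw [hasCat_append_singleton, hceq]; simp
            have hO : hasCat "OTHER" (st.1 ++ [p]) = true := by
              rw [hasCat_append_singleton, hceq]; simp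
            rw [hstep, ih, hI, hO]
            simp only [qpart, h1, h2, h3, Bool.false_eq_true, if_false, if_true,
              Bool.eq_false_iff.mpr hso]
            simp [insFold_cons]
        · have hstep : stepA2 st p = st := by simp [stepA2, h1, h2, h3]
          rw [hstep, ih]
          simp only [qpart, h1, h2, h3, Bool.false_eq_true, if_false]

-- B's qwen fold computes qpart and the final flags
theorem bfold_eq (q : List String) (st : List String × Bool × Bool × Bool) :
    q.foldl stepB st =
    (st.1 ++ qpart q st.2.1 st.2.2.1,
     st.2.1 || hasCat "INTERFACE" q, st.2.2.1 || hasCat "OTHER" q, st.2.2.2 || hasCat "LOOP" q) := by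
  induction q generalizing st with
  | nil => simp [qpart, hasCat]
  | cons p ps ih =>
    obtain ⟨l, si, so, hl⟩ := st
    rw [List.foldl_cons]
    simp only [hasCat_cons]
    by_cases h1 : (classify_pragma p == "LOOP") = true
    · have hstep : stepB (l, si, so, hl) p = (l ++ [p], si, so, true) := by simp [stepB, h1]
      rw [hstep, ih]
      simp only [qpart, h1, if_true]
      simp [eq_of_beq h1]
    · by_cases h2 : (classify_pragma p == "INTERFACE") = true
      · cases si
        · have hstep : stepB (l, false, so, hl) p = (l ++ [p], true, so, hl) := by
            simp [stepB, h1, h2]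
          rw [hstep, ih]
          simp only [qpart, h1, h2, Bool.false_eq_true, if_false, if_true]
          simp [eq_of_beq h2]
        · have hstep : stepB (l, true, so, hl) p = (l, true, so, hl) := by
            simp [stepB, h1, h2]
          rw [hstep, ih]
          simp only [qpart, h1, h2, Bool.false_eq_true, if_false, if_true]
          simp [eq_of_beq h2]
      · by_cases h3 : (classify_pragma p == "OTHER") = true
        · cases so
          · have hstep : stepB (l, si, false, hl) p = (l ++ [p], si, true, hl) := by
              simp [stepB, h1, h2, h3]
            rw [hstep, ih]
            simp only [qpart, h1, h2, h3, Bool.false_eq_true, if_false, if_true]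
            simp
          · have hstep : stepB (l, si, true, hl) p = (l, si, true, hl) := by
              simp [stepB, h1, h2, h3]
            rw [hstep, ih]
            simp only [qpart, h1, h2, h3, Bool.false_eq_true, if_false, if_true]
            simp
        · have hstep : stepB (l, si, so, hl) p = (l, si, so, hl) := by
            simp [stepB, h1, h2, h3]
          rw [hstep, ih]
          simp only [qpart, h1, h2, h3, Bool.false_eq_true, if_false]
          simp

-- phase 3 of A, when qwen contributed a LOOP pragma: nothing happens
theorem phase3_skip (g : List String) (st : List String × PySem.Dict String String)
    (q : String) (hq : q ∈ st.1) (hql : classify_pragma q = "LOOP")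
    (hqs : st.2.get? q = some "qwen") :
    g.foldl stepA3 st = st := by
  have hin : (st.1.any fun m => classify_pragma m == "LOOP" && (st.2.get? m == some "qwen")) = true :=
    List.any_eq_true.mpr ⟨q, hq, by simp [hql, hqs]⟩
  induction g with
  | nil => rfl
  | cons p ps ih =>
    rw [List.foldl_cons]
    have hstep : stepA3 st p = st := by
      unfold stepA3
      rw [hin]
      simp
    rw [hstep]
    exact ih

-- phase 3 of A after the first fallback pragma f has been appended
theorem phase3_after (g : List String) (base : List String) (R : List String)
    (d : PySem.Dict String String)
    (f : String) (hf : classify_pragma f = "LOOP")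
    (hbase : ∀ m ∈ base, ¬ classify_pragma m = "LOOP")
    (hR : ∀ r ∈ R, r = f) (hRne : R ≠ [])
    (hd : d.get? f = some "gemma4_fallback") :
    g.foldl stepA3 (base ++ R, d) =
    (base ++ R ++ ((g.filter (fun p => classify_pragma p == "LOOP")).filter (fun p => p == f)),
     insFold "gemma4_fallback" ((g.filter (fun p => classify_pragma p == "LOOP")).filter (fun p => p == f)) d) := by
  induction g generalizing R d with
  | nil => simp [insFold]
  | cons p ps ih =>
    rw [List.foldl_cons, List.filter_cons]
    by_cases h1 : (classify_pragma p == "LOOP") = true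
    · by_cases h2 : (p == f) = true
      · have hpf := eq_of_beq h2
        subst hpf
        have houter : ((base ++ R).any fun m => classify_pragma m == "LOOP" && m != p) = false := by
          rw [List.any_eq_false]
          intro m hm
          rcases List.mem_append.mp hm with hb | hr
          · simp only [Bool.and_eq_true, beq_iff_eq, not_and]
            intro hmem
            exact absurd hmem (hbase m hb)
          · have := hR m hr
            subst this
            simp
        have hinner : ((base ++ R).any fun m => classify_pragma m == "LOOP" && (d.get? m == some "qwen")) = false := by
          rw [List.any_eq_false]
          intro m hm
          rcases List.mem_append.mp hm with hb | hr
          · simp only [Bool.and_eq_true, beq_iff_eq, not_and]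
            intro hmem
            exact absurd hmem (hbase m hb)
          · have := hR m hr
            subst this
            simp [hd]
        have hstep : stepA3 (base ++ R, d) p = ((base ++ R) ++ [p], d.insert p "gemma4_fallback") := by
          unfold stepA3
          rw [houter, hinner]
          simp [h1]
        have hassoc : (base ++ R) ++ [p] = base ++ (R ++ [p]) := by simp
        rw [hstep, hassoc]
        rw [ih (R ++ [p]) (d.insert p "gemma4_fallback")
          (by intro r hr
              rcases List.mem_append.mp hr with h | h
              · exact hR r h
              · simpa using h)
          (by simp)
          (by simp [pysem])]
        rw [if_pos h1, List.filter_cons, if_pos h2, insFold_cons]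
        simp
      · have hpf : p ≠ f := fun h => absurd (beq_iff_eq.mpr h) (by simp [h2])
        obtain ⟨r0, hr0⟩ : ∃ r, r ∈ R := by
          cases R with
          | nil => exact absurd rfl hRne
          | cons a l => exact ⟨a, List.mem_cons_self ..⟩
        have houter : ((base ++ R).any fun m => classify_pragma m == "LOOP" && m != p) = true := by
          refine List.any_eq_true.mpr ⟨r0, List.mem_append.mpr (Or.inr hr0), ?_⟩
          have := hR r0 hr0
          subst this
          simp only [Bool.and_eq_true, beq_iff_eq, bne_iff_ne]
          exact ⟨hf, fun h => hpf h.symm⟩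
        have hstep : stepA3 (base ++ R, d) p = (base ++ R, d) := by
          unfold stepA3
          rw [houter]
          simp
        rw [hstep, if_pos h1, List.filter_cons, if_neg h2]
        exact ih R d hR hRne hd
    · have hstep : stepA3 (base ++ R, d) p = (base ++ R, d) := by
        unfold stepA3
        simp [h1]
      rw [hstep, if_neg h1]
      exact ih R d hR hRne hd

-- phase 3 of A when the current merged list holds no LOOP pragma
theorem phase3_noloop (g : List String) (base : List String) (d : PySem.Dict String String)
    (hbase : ∀ m ∈ base, ¬ classify_pragma m = "LOOP") :
    g.foldl stepA3 (base, d) =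
    (base ++ fb g, insFold "gemma4_fallback" (fb g) d) := by
  induction g with
  | nil => simp [fb, insFold]
  | cons p ps ih =>
    rw [List.foldl_cons]
    by_cases h1 : (classify_pragma p == "LOOP") = true
    · have hfb : fb (p :: ps) = p :: (ps.filter (fun x => classify_pragma x == "LOOP")).filter (fun x => x == p) := by
        simp [fb, h1]
      have houter : (base.any fun m => classify_pragma m == "LOOP" && m != p) = false := by
        rw [List.any_eq_false]
        intro m hm
        simp only [Bool.and_eq_true, beq_iff_eq, not_and]
        intro hmem
        exact absurd hmem (hbase m hm)
      have hinner : (base.any fun m => classify_pragma m == "LOOP" && (d.get? m == some "qwen")) = false := by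
        rw [List.any_eq_false]
        intro m hm
        simp only [Bool.and_eq_true, beq_iff_eq, not_and]
        intro hmem
        exact absurd hmem (hbase m hm)
      have hstep : stepA3 (base, d) p = (base ++ [p], d.insert p "gemma4_fallback") := by
        unfold stepA3
        rw [houter, hinner]
        simp [h1]
      rw [hstep]
      rw [phase3_after ps base [p] (d.insert p "gemma4_fallback") p (eq_of_beq h1) hbase
        (by simp) (by simp) (by simp [pysem])]
      rw [hfb]
      simp [insFold_cons]
    · have hfb : fb (p :: ps) = fb ps := by
        simp [fb, h1]
      have hstep : stepA3 (base, d) p = (base, d) := by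
        unfold stepA3
        simp [h1]
      rw [hstep, ih, hfb]

-- outside D_ with no qwen loop, all gemma LOOP pragmas equal the first, so fb g is all of them
theorem fb_eq_loops_of_allhead (g : List String)
    (h : ∀ p ∈ g.filter (fun x => classify_pragma x == "LOOP"),
      (g.filter (fun x => classify_pragma x == "LOOP")).head? = some p) :
    fb g = g.filter (fun p => classify_pragma p == "LOOP") := by
  unfold fb
  rcases hfl : g.filter (fun p => classify_pragma p == "LOOP") with _ | ⟨f, fs⟩
  · rfl
  · show List.filter (fun p => p == f) (f :: fs) = f :: fs
    refine List.filter_eq_self.mpr ?_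
    intro a ha
    have := h a (hfl ▸ ha)
    rw [hfl] at this
    simp only [List.head?_cons, Option.some.injEq] at this
    simp [this]

-- no MEMORY pragma or qwen-part element classifies as LOOP (used by both final proofs)
theorem base_noloop (q g : List String) (hl' : hasCat "LOOP" q = false) :
    ∀ m ∈ g.filter (fun p => classify_pragma p == "MEMORY") ++ qpart q false false,
      ¬ classify_pragma m = "LOOP" := by
  intro m hm hml
  rcases List.mem_append.mp hm with hb | hr
  · have := (List.mem_filter.mp hb).2
    rw [eq_of_beq this] at hml
    exact absurd hml (by decide)
  · have hmq : m ∈ q := qpart_subset hr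
    have : hasCat "LOOP" q = true :=
      List.any_eq_true.mpr ⟨m, hmq, beq_iff_eq.mpr hml⟩
    rw [hl'] at this
    cases this

-- ===== VERDICT (by name: the statements are the Claim_ definitions above) =====
theorem merge_pragmas_cmps_spec : Claim_unchanged_merge_pragmas_cmps := by
  intro q g _ hnD
  rw [portA_eq, portB_eq]
  have hImem : hasCat "INTERFACE" (g.filter (fun p => classify_pragma p == "MEMORY")) = false := by
    rw [hasCat, List.any_eq_false]
    intro m hm
    have := (List.mem_filter.mp hm).2
    rw [eq_of_beq this]
    decide
  have hOmem : hasCat "OTHER" (g.filter (fun p => classify_pragma p == "MEMORY")) = false := by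
    rw [hasCat, List.any_eq_false]
    intro m hm
    have := (List.mem_filter.mp hm).2
    rw [eq_of_beq this]
    decide
  rw [phase1_eq, phase2_eq, bfold_eq]
  simp only [List.nil_append, Bool.false_or, hImem, hOmem]
  by_cases hl : hasCat "LOOP" q = true
  · -- qwen has a LOOP pragma: A's phase 3 does nothing, B's fallback is empty
    obtain ⟨qq, hqq, hqql⟩ := List.any_eq_true.mp hl
    have hqQ : qq ∈ qpart q false false := loop_mem_qpart _ _ hqq (eq_of_beq hqql)
    rw [phase3_skip _ _ qq
      (List.mem_append.mpr (Or.inr hqQ)) (eq_of_beq hqql)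
      (get?_insFold_mem _ hqQ)]
    rw [hl]
    simp [fallbackB, insFold]
  · -- qwen has no LOOP pragma: outside D_, all gemma loops equal the first, so fb g = all of them
    have hl' : hasCat "LOOP" q = false := Bool.eq_false_iff.mpr hl
    have hall : ∀ p ∈ g.filter (fun x => classify_pragma x == "LOOP"),
        (g.filter (fun x => classify_pragma x == "LOOP")).head? = some p := by
      intro p hp
      by_contra hne
      exact hnD ⟨hl', p, hp, hne⟩
    rw [phase3_noloop _ _ _ (base_noloop q g hl')]
    rw [hl', fb_eq_loops_of_allhead g hall]
    simp [fallbackB]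

theorem merge_pragmas_cmps_changed : Claim_changed_merge_pragmas_cmps := by
  unfold Claim_changed_merge_pragmas_cmps; decide

theorem merge_pragmas_cmps_tight : Claim_exact_merge_pragmas_cmps := by
  intro q g _ hD
  obtain ⟨hl', p, hp, hne⟩ := hD
  have hl'' : hasCat "LOOP" q = false := hl'
  rw [portA_eq, portB_eq, phase1_eq, phase2_eq, bfold_eq]
  simp only [List.nil_append, Bool.false_or]
  rw [phase3_noloop _ _ _ (by
    have hImem : hasCat "INTERFACE" (g.filter (fun x => classify_pragma x == "MEMORY")) = false := by
      rw [hasCat, List.any_eq_false]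
      intro m hm
      have := (List.mem_filter.mp hm).2
      rw [eq_of_beq this]
      decide
    have hOmem : hasCat "OTHER" (g.filter (fun x => classify_pragma x == "MEMORY")) = false := by
      rw [hasCat, List.any_eq_false]
      intro m hm
      have := (List.mem_filter.mp hm).2
      rw [eq_of_beq this]
      decide
    rw [hImem, hOmem]
    exact base_noloop q g hl'')]
  intro hEq
  have h1 := congrArg Prod.fst hEq
  simp only at h1
  -- compare lengths of the merged lists
  have hflags : hasCat "INTERFACE" (g.filter (fun x => classify_pragma x == "MEMORY")) = false ∧
      hasCat "OTHER" (g.filter (fun x => classify_pragma x == "MEMORY")) = false := by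
    constructor <;>
      · rw [hasCat, List.any_eq_false]
        intro m hm
        have := (List.mem_filter.mp hm).2
        rw [eq_of_beq this]
        decide
  rw [hflags.1, hflags.2, hl''] at h1
  simp only [fallbackB, Bool.false_eq_true, if_false] at h1
  have hlen := congrArg List.length h1
  simp only [List.length_append] at hlen
  have hfb_lt : (fb g).length < (g.filter (fun x => classify_pragma x == "LOOP")).length := by
    rcases hfl : g.filter (fun x => classify_pragma x == "LOOP") with _ | ⟨f, fs⟩
    · rw [hfl] at hp; cases hp
    · have hp' : p ∈ f :: fs := hfl ▸ hp
      have hpf : (p == f) = false := by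
        rw [hfl] at hne
        simp only [List.head?_cons] at hne
        rw [beq_eq_false_iff_ne]
        exact fun h => hne (by rw [h])
      have hfbe : fb g = List.filter (fun x => x == f) (f :: fs) := by
        simp only [fb, hfl]
      rw [hfbe]
      have hle : (List.filter (fun x => x == f) (f :: fs)).length ≤ (f :: fs).length :=
        List.length_filter_le _ _
      have hneq : (List.filter (fun x => x == f) (f :: fs)).length ≠ (f :: fs).length := by
        intro h
        have := List.length_filter_eq_length_iff.mp h p hp'
        rw [hpf] at this
        cases this
      omega
  omega
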